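-- pv_equiv track=rewrite | github.com/ZVengin/fride | llm_eval/create_eval_dataset.py | extract_dialogue
-- ===== SOURCE A (Python) =====
-- def extract_dialogue(paras):
--     new_parags =[]
--     dialogue=[]
--     for para in paras:
--         if para.get('target_label') == 'Dialogue':
--             dialogue.append(para)
--         else:
--             if len(dialogue)>0:
--                 new_para = {
--                     'idx':dialogue[0].get('idx'),
--                     'paragraph_index':dialogue[0].get('paragraph_index'),
--                     'paragraph': '\n'.join([p.get('paragraph') for p in dialogue]),
--                     'target_label':'Dialogue'
--                 }
--                 new_parags.append(new_para)
--                 dialogue = []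
--             new_parags.append(para)
--     if len(dialogue) > 0:
--         new_para = {
--             'idx': dialogue[0].get('idx'),
--             'paragraph_index': dialogue[0].get('paragraph_index'),
--             'paragraph': '\n'.join([p.get('paragraph') for p in dialogue]),
--             'target_label': 'Dialogue'
--         }
--         new_parags.append(new_para)
--     return new_parags
-- ===== SOURCE B (Python) =====
-- def extract_dialogue(paras):
--     def is_dlg(p):
--         return p.get('target_label') == 'Dialogue'
--
--     out = []
--     n = len(paras)
--     i = 0
--     while i < n:
--         if not is_dlg(paras[i]):
--             out.append(paras[i])
--             i += 1
--         else:
--             j = i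
--             while j < n and is_dlg(paras[j]):
--                 j += 1
--             run = paras[i:j]
--             out.append({
--                 'idx': run[0].get('idx'),
--                 'paragraph_index': run[0].get('paragraph_index'),
--                 'paragraph': '\n'.join(p.get('paragraph') for p in run),
--                 'target_label': 'Dialogue',
--             })
--             i = j
--     return out
-- ===== Notes on version B (the rewrite author's own statement) =====
-- stated objective: alternative
-- what changed: Replaced A's stateful buffer-and-flush accumulation (with its duplicated end-of-loop flush) by a two-pointer index scanner: an outer cursor that, at the start of each dialogue run, scans ahead with a second index to find the run's end, slices the run out, and jumps the cursor past it, so no buffer or flush exists.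
import Mathlib
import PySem

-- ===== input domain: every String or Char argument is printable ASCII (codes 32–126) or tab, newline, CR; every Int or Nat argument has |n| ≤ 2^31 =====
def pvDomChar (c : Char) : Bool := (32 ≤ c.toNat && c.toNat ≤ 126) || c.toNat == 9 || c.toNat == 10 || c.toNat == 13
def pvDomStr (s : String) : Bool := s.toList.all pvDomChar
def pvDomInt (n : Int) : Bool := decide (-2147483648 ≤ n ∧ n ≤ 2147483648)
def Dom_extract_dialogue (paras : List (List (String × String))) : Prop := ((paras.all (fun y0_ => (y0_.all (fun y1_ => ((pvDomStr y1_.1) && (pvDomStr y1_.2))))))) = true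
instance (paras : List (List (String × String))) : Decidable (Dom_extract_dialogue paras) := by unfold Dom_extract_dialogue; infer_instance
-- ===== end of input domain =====

-- B replaces A's stateful buffer-and-flush accumulation by a two-pointer index scanner that
-- slices each dialogue run out and jumps past it (objective: alternative; same cost).

-- shared helpers: Python `d.get(k)` on these dicts, the 'Dialogue' test, and the merged dict
-- literal A and B both build (keys in the Python dict literal's insertion order)
def pvGet (p : List (String × String)) (k : String) : Option String :=
  (PySem.Dict.mk p).get? k

def pvIsDlg (p : List (String × String)) : Bool :=
  pvGet p "target_label" == some "Dialogue"

-- the merged-dialogue dict; `.getD ""` is only reached outside Pre_extract_dialogue (where the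
-- Python value would be None / a TypeError)
def pvMergeDlg (dlg : List (List (String × String))) : List (String × String) :=
  [("idx", (pvGet (dlg.headD []) "idx").getD ""),
   ("paragraph_index", (pvGet (dlg.headD []) "paragraph_index").getD ""),
   ("paragraph", PySem.Str.join "\n" (dlg.map (fun p => (pvGet p "paragraph").getD ""))),
   ("target_label", "Dialogue")]

-- ===== PORT A =====
-- A's loop state: (new_parags, dialogue buffer); one foldl step per para, then the final flush
def pvStepA (st : List (List (String × String)) × List (List (String × String)))
    (para : List (String × String)) :
    List (List (String × String)) × List (List (String × String)) :=
  if pvIsDlg para then (st.1, st.2 ++ [para])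
  else
    let acc := if st.2.length > 0 then st.1 ++ [pvMergeDlg st.2] else st.1
    (acc ++ [para], [])

def pvFinishA (st : List (List (String × String)) × List (List (String × String))) :
    List (List (String × String)) :=
  if st.2.length > 0 then st.1 ++ [pvMergeDlg st.2] else st.1

def extract_dialogue (paras : List (List (String × String))) : List (List (String × String)) :=
  pvFinishA (paras.foldl pvStepA ([], []))

-- ===== PORT B =====
-- B: the inner `while j < n and is_dlg(paras[j]): j += 1` scan (paras[j] is in range, so getD's
-- default is never read)
def pvScanEnd (paras : List (List (String × String))) (j : Nat) : Nat :=
  if j < paras.length ∧ pvIsDlg (paras.getD j []) = true then pvScanEnd paras (j + 1) else j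
termination_by paras.length - j
decreasing_by omega

-- cited by pvGoB's termination proof
theorem le_pvScanEnd (paras : List (List (String × String))) (j : Nat) :
    j ≤ pvScanEnd paras j := by
  induction j using pvScanEnd.induct (paras := paras) with
  | case1 j h ih => rw [pvScanEnd, if_pos h]; omega
  | case2 j h => rw [pvScanEnd, if_neg h]

-- B's outer `while i < n` loop: state (i, out); paras[i] is in range, paras[i:j] is slice
def pvGoB (paras : List (List (String × String))) (i : Nat)
    (out : List (List (String × String))) : List (List (String × String)) :=
  if hi : i < paras.length then
    if pvIsDlg (paras.getD i []) = false then
      pvGoB paras (i + 1) (out ++ [paras.getD i []])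
    else
      pvGoB paras (pvScanEnd paras i)
        (out ++ [pvMergeDlg (PySem.List.slice paras (some (i : Int)) (some ((pvScanEnd paras i : Nat) : Int)))])
  else out
termination_by paras.length - i
decreasing_by
  · omega
  · have h1 : i + 1 ≤ pvScanEnd paras (i + 1) := le_pvScanEnd paras (i + 1)
    have h2 : pvScanEnd paras i = pvScanEnd paras (i + 1) := by
      rw [pvScanEnd, if_pos ⟨hi, by simpa using ‹¬pvIsDlg (paras.getD i []) = false›⟩]
    omega

def extract_dialogue_alt (paras : List (List (String × String))) : List (List (String × String)) :=
  pvGoB paras 0 []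

-- ===== PRECONDITION & SPEC =====
def pvHasKey (p : List (String × String)) (k : String) : Bool := (pvGet p k).isSome

-- Pre_ excludes inputs where some Dialogue para lacks the 'paragraph' key (Python A raises
-- TypeError in '\n'.join) or where the first para of a Dialogue run lacks 'idx' or
-- 'paragraph_index' (A then returns a dict containing None, not a value of the declared
-- string-dict type).
def Pre_extract_dialogue (paras : List (List (String × String))) : Prop :=
  (∀ p ∈ paras, pvIsDlg p = true → pvHasKey p "paragraph" = true) ∧
  (∀ p ∈ paras.take 1, pvIsDlg p = true →
      pvHasKey p "idx" = true ∧ pvHasKey p "paragraph_index" = true) ∧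
  (∀ pr ∈ paras.zip (paras.drop 1), pvIsDlg pr.1 = false → pvIsDlg pr.2 = true →
      pvHasKey pr.2 "idx" = true ∧ pvHasKey pr.2 "paragraph_index" = true)

instance (paras : List (List (String × String))) : Decidable (Pre_extract_dialogue paras) := by
  unfold Pre_extract_dialogue; infer_instance

def pvWitness_extract_dialogue : (List (List (String × String))) :=
  [[("target_label", "Dialogue"), ("idx", "1"), ("paragraph_index", "0"), ("paragraph", "hi")],
   [("target_label", "Dialogue"), ("paragraph", "there")],
   [("target_label", "Narration"), ("paragraph", "x")]]

def Spec_extract_dialogue (paras : List (List (String × String))) (out : List (List (String × String))) : Prop := out = extract_dialogue_alt paras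
instance (paras : List (List (String × String))) (out : List (List (String × String))) : Decidable (Spec_extract_dialogue paras out) := by unfold Spec_extract_dialogue; infer_instance

-- ===== CLAIM (what is proved, stated in full; the proofs are below) =====
def Claim_equal_extract_dialogue : Prop := ∀ (paras : List (List (String × String))), Dom_extract_dialogue paras → Pre_extract_dialogue paras → Spec_extract_dialogue paras (extract_dialogue paras)

-- ===== LEMMAS AND PROOFS =====

-- proof-side middle form: recursion on maximal dialogue runs; both ports reduce to it
def pvRunrec : List (List (String × String)) → List (List (String × String))
  | [] => []
  | p :: rest =>
    if pvIsDlg p then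
      pvMergeDlg (p :: rest.takeWhile pvIsDlg) :: pvRunrec (rest.dropWhile pvIsDlg)
    else p :: pvRunrec rest
termination_by l => l.length
decreasing_by
  · simp only [List.length_cons]
    exact Nat.lt_succ_of_le (List.length_dropWhile_le _ _)
  · simp

-- the finish step distributes over an already-emitted prefix
theorem pvFinishA_append (acc l : List (List (String × String)))
    (d : List (List (String × String))) :
    pvFinishA (acc ++ l, d) = acc ++ pvFinishA (l, d) := by
  unfold pvFinishA; split <;> simp

-- A's fold only appends to the emitted list: the accumulator factors out
theorem pvFoldA_acc (ps : List (List (String × String)))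
    (acc dlg : List (List (String × String))) :
    ps.foldl pvStepA (acc, dlg) =
      (acc ++ (ps.foldl pvStepA ([], dlg)).1, (ps.foldl pvStepA ([], dlg)).2) := by
  induction ps generalizing acc dlg with
  | nil => simp
  | cons p ps ih =>
    simp only [List.foldl_cons]
    by_cases h : pvIsDlg p = true
    · rw [ih, pvStepA]; simp [h, pvStepA]
    · rw [ih, pvStepA]
      simp only [h, Bool.false_eq_true, if_false, pvStepA]
      rw [ih ((if dlg.length > 0 then [] ++ [pvMergeDlg dlg] else []) ++ [p]) []]
      split <;> simp

-- a non-Dialogue para flushes the buffer through pvFinishA and resets it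
theorem pvStepA_nondlg (st : List (List (String × String)) × List (List (String × String)))
    (p : List (String × String)) (h : pvIsDlg p = false) :
    pvStepA st p = (pvFinishA st ++ [p], []) := by
  simp [pvStepA, pvFinishA, h]

-- A's fold-then-flush, with and without a pending dialogue buffer, equals pvRunrec
theorem pvMainA (ps : List (List (String × String))) :
    (pvFinishA (ps.foldl pvStepA ([], [])) = pvRunrec ps) ∧
    (∀ dlg : List (List (String × String)), dlg ≠ [] →
      pvFinishA (ps.foldl pvStepA ([], dlg)) =
        pvMergeDlg (dlg ++ ps.takeWhile pvIsDlg) ::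
          pvRunrec (ps.dropWhile pvIsDlg)) := by
  induction ps with
  | nil =>
    constructor
    · simp [pvFinishA, pvRunrec]
    · intro dlg hd
      simp [pvFinishA, pvRunrec, List.length_pos_iff.mpr hd]
  | cons p ps ih =>
    by_cases h : pvIsDlg p = true
    · constructor
      · simp only [List.foldl_cons, pvStepA, h, if_true, List.nil_append]
        rw [ih.2 [p] (by simp)]
        rw [pvRunrec]
        simp [h]
      · intro dlg hd
        simp only [List.foldl_cons, pvStepA, h, if_true]
        rw [ih.2 (dlg ++ [p]) (by simp)]
        simp [h]
    · rw [Bool.not_eq_true] at h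
      have hstep : ∀ dlg, List.foldl pvStepA (pvStepA ([], dlg) p) ps =
          ((pvFinishA ([], dlg) ++ [p]) ++ (ps.foldl pvStepA ([], [])).1,
            (ps.foldl pvStepA ([], [])).2) := by
        intro dlg; rw [pvStepA_nondlg _ _ h, pvFoldA_acc]
      constructor
      · simp only [List.foldl_cons, hstep [], pvFinishA_append]
        rw [ih.1, pvRunrec]
        simp [pvFinishA, h]
      · intro dlg hd
        simp only [List.foldl_cons, hstep dlg, pvFinishA_append]
        rw [ih.1]
        have hfin : pvFinishA ([], dlg) = [pvMergeDlg dlg] := by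
          simp [pvFinishA, List.length_pos_iff.mpr hd]
        rw [hfin, List.takeWhile_cons, List.dropWhile_cons]
        simp only [h, Bool.false_eq_true, if_false]
        simp [pvRunrec, h]

-- the inner scan computes exactly the takeWhile/dropWhile split of the suffix at i
theorem pvScanEnd_spec (paras : List (List (String × String))) (i : Nat) :
    (paras.drop i).take (pvScanEnd paras i - i) = (paras.drop i).takeWhile pvIsDlg ∧
    paras.drop (pvScanEnd paras i) = (paras.drop i).dropWhile pvIsDlg := by
  induction i using pvScanEnd.induct (paras := paras) with
  | case1 i h ih =>
    obtain ⟨hlt, hflag⟩ := h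
    have hdrop : paras.drop i = paras[i] :: paras.drop (i + 1) :=
      List.drop_eq_getElem_cons hlt
    have hget : paras.getD i [] = paras[i] := List.getD_eq_getElem _ _ hlt
    rw [hget] at hflag
    have hle : i + 1 ≤ pvScanEnd paras (i + 1) := le_pvScanEnd paras (i + 1)
    rw [pvScanEnd, if_pos ⟨hlt, by rw [hget]; exact hflag⟩]
    constructor
    · have h1 : pvScanEnd paras (i + 1) - i = (pvScanEnd paras (i + 1) - (i + 1)) + 1 := by omega
      rw [hdrop, h1, List.take_succ_cons, ih.1, List.takeWhile_cons, hflag]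
      simp
    · rw [hdrop, List.dropWhile_cons, hflag]
      simpa using ih.2
  | case2 i h =>
    rw [pvScanEnd, if_neg h]
    by_cases hlt : i < paras.length
    · have hflag : pvIsDlg (paras.getD i []) = false := by
        rcases Bool.eq_false_or_eq_true (pvIsDlg (paras.getD i [])) with ht | hf
        · exact absurd ⟨hlt, ht⟩ h
        · exact hf
      have hdrop : paras.drop i = paras[i] :: paras.drop (i + 1) :=
        List.drop_eq_getElem_cons hlt
      have hget : paras.getD i [] = paras[i] := List.getD_eq_getElem _ _ hlt
      rw [hget] at hflag
      constructor
      · rw [Nat.sub_self, List.take_zero, hdrop, List.takeWhile_cons, hflag]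
        simp
      · conv_rhs => rw [hdrop, List.dropWhile_cons, hflag]
        rw [hdrop]
        simp
    · have hnil : paras.drop i = [] := List.drop_eq_nil_of_le (by omega)
      simp [hnil]

-- B's loop equals the emitted prefix plus pvRunrec of the unprocessed suffix
theorem pvGoB_spec (paras : List (List (String × String))) (i : Nat)
    (out : List (List (String × String))) :
    pvGoB paras i out = out ++ pvRunrec (paras.drop i) := by
  induction i, out using pvGoB.induct (paras := paras) with
  | case1 i out hi hflag ih =>
    have hdrop : paras.drop i = paras[i] :: paras.drop (i + 1) :=
      List.drop_eq_getElem_cons hi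
    have hget : paras.getD i [] = paras[i] := List.getD_eq_getElem _ _ hi
    rw [pvGoB, dif_pos hi, if_pos hflag, ih, hdrop, pvRunrec]
    rw [hget] at hflag
    simp [hflag, List.getElem?_eq_getElem hi]
  | case2 i out hi hflag ih =>
    have hflag' : pvIsDlg (paras.getD i []) = true := by
      simpa using hflag
    have hdrop : paras.drop i = paras[i] :: paras.drop (i + 1) :=
      List.drop_eq_getElem_cons hi
    have hget : paras.getD i [] = paras[i] := List.getD_eq_getElem _ _ hi
    have hscan := pvScanEnd_spec paras i
    have hslice : PySem.List.slice paras (some (i : Int)) (some ((pvScanEnd paras i : Nat) : Int))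
        = (paras.drop i).takeWhile pvIsDlg := by
      rw [PySem.List.slice_natCast]; exact hscan.1
    rw [pvGoB, dif_pos hi, if_neg hflag, ih, hslice, hscan.2]
    rw [hget] at hflag'
    conv_rhs => rw [hdrop, pvRunrec]
    rw [hdrop, List.takeWhile_cons, List.dropWhile_cons, hflag']
    simp
  | case3 i out hi =>
    have hnil : paras.drop i = [] := List.drop_eq_nil_of_le (by omega)
    rw [pvGoB, dif_neg hi]
    simp [hnil, pvRunrec]

-- ===== VERDICT (by name: the statement is the Claim_ definition above) =====
theorem extract_dialogue_spec : Claim_equal_extract_dialogue := by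
  intro paras _ _
  unfold Spec_extract_dialogue extract_dialogue extract_dialogue_alt
  rw [pvGoB_spec]
  simpa using (pvMainA paras).1
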